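-- pv_equiv track=rewrite | github.com/Domofold/liceum | zadanka/zadania - algorytmy na tekstach/slowa_binarne/zadanie.py | czy_bloki
-- ===== SOURCE A (Python) =====
-- def czy_bloki(wiersz):
--     pierwsza = wiersz[0]
--     if pierwsza == '1':
--         return False
--     for i in range(0,len(wiersz)):
--         ile_drugich = 0
--         if wiersz[i] == pierwsza:
--             continue
--         else:
--             druga = wiersz[i]
--             for j in range(i, len(wiersz)):
--                 if wiersz[j] != druga:
--                     return False
--                 else:
--                     ile_drugich += 1
--         if ile_drugich == 0:
--             return False
--         return True
-- ===== SOURCE B (Python) =====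
-- def czy_bloki(wiersz):
--     # A word is "blocks" iff it does not start with '1' and consists of
--     # exactly two maximal runs of equal characters.
--     if wiersz[0] == '1':
--         return False
--     bloki = 1
--     for prev, c in zip(wiersz, wiersz[1:]):
--         if c != prev:
--             bloki += 1
--     return bloki == 2
-- ===== Notes on version B (the rewrite author's own statement) =====
-- stated objective: simpler
-- what changed: Replaces A's nested index scans with one adjacent-pairs pass counting maximal runs; Pre_ excludes the empty string (A raises IndexError) and uniform strings not starting with '1', where A falls off the end returning None instead of a bool (B returns False there).
-- outside the precondition, e.g. on czy_bloki('000'): A returns None, B returns False; on czy_bloki(''): A raises IndexError, B raises IndexError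
import Mathlib
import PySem

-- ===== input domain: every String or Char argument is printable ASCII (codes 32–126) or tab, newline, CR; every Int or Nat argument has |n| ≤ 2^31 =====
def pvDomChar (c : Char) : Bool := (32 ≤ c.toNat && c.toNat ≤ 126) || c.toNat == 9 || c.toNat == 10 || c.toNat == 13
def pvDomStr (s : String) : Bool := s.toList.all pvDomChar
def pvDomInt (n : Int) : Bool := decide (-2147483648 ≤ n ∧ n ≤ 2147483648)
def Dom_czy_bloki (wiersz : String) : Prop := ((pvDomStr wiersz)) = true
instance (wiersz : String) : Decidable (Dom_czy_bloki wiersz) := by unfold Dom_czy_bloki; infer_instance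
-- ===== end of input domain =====

-- B counts maximal runs in one adjacent-pairs pass and returns a bool (objective: simpler).

-- ===== PORT A =====
-- inner loop 'for j in range(i, len(wiersz))' with the ile_drugich counter
def czyInnerA (druga : Char) : List Char → Nat → Option Bool
  | [], ile => if ile = 0 then some false else some true
  | c :: t, ile => if c ≠ druga then some false else czyInnerA druga t (ile + 1)

-- outer loop 'for i in range(0, len(wiersz))'
def czyOuterA (pierwsza : Char) : List Char → Option Bool
  | [] => none                       -- loop falls through: Python returns None
  | c :: t =>
    if c = pierwsza then czyOuterA pierwsza t
    else czyInnerA c (c :: t) 0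

def czy_bloki (wiersz : String) : Option Bool :=
  match PySem.Str.pyGet? wiersz 0 with
  | none => none                     -- IndexError on '', excluded by Pre_
  | some pierwsza =>
    if pierwsza = '1' then some false
    else czyOuterA pierwsza wiersz.toList

-- ===== PORT B =====
-- 'for prev, c in zip(wiersz, wiersz[1:])': fold over adjacent pairs
def czyStepB (bloki : Nat) (pc : Char × Char) : Nat :=
  if pc.2 ≠ pc.1 then bloki + 1 else bloki

def czy_bloki_alt (wiersz : String) : Option Bool :=
  match PySem.Str.pyGet? wiersz 0 with
  | none => none                     -- IndexError on '', excluded by Pre_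
  | some c0 =>
    if c0 = '1' then some false
    else
      -- wiersz[1:] on a string is its tail
      some ((wiersz.toList.zip wiersz.toList.tail).foldl czyStepB 1 == 2)

-- ===== PRECONDITION & SPEC =====
-- Pre_ excludes the empty string (A raises IndexError) and nonempty uniform strings not
-- starting with '1', where A falls off the end and returns None instead of a bool.
def Pre_czy_bloki (wiersz : String) : Prop :=
  wiersz ≠ "" ∧ (wiersz.toList.headI = '1' ∨ wiersz.toList.any (fun c => c ≠ wiersz.toList.headI) = true)
instance (wiersz : String) : Decidable (Pre_czy_bloki wiersz) := by unfold Pre_czy_bloki; infer_instance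
def pvWitness_czy_bloki : String := "0011"

def Spec_czy_bloki (wiersz : String) (out : Option Bool) : Prop := out = czy_bloki_alt wiersz
instance (wiersz : String) (out : Option Bool) : Decidable (Spec_czy_bloki wiersz out) := by unfold Spec_czy_bloki; infer_instance

-- ===== CLAIM (what is proved, stated in full; the proofs are below) =====
def Claim_equal_czy_bloki : Prop := ∀ (wiersz : String), Dom_czy_bloki wiersz → Pre_czy_bloki wiersz → Spec_czy_bloki wiersz (czy_bloki wiersz)

-- ===== LEMMAS AND PROOFS =====
-- abbreviation for B's fold over the pairs of a :: l
def czyG (a : Char) (l : List Char) (b : Nat) : Nat :=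
  ((a :: l).zip l).foldl czyStepB b

lemma czyG_cons (a c : Char) (t : List Char) (b : Nat) :
    czyG a (c :: t) b = czyG c t (if c ≠ a then b + 1 else b) := by
  simp [czyG, czyStepB]

lemma czyG_ge (l : List Char) (a : Char) (b : Nat) : b ≤ czyG a l b := by
  induction l generalizing a b with
  | nil => simp [czyG]
  | cons c t ih =>
    rw [czyG_cons]
    refine le_trans ?_ (ih c _)
    split <;> omega

lemma czyG_all (l : List Char) (a : Char) (b : Nat) (h : ∀ x ∈ l, x = a) :
    czyG a l b = b := by
  induction l with
  | nil => simp [czyG]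
  | cons c t ih =>
    have hc : c = a := h c (by simp)
    subst hc
    rw [czyG_cons]
    simp only [ne_eq, not_true_eq_false, ite_false]
    exact ih (fun x hx => h x (by simp [hx]))

lemma czyG_lt (l : List Char) (a : Char) (b : Nat) (h : ∃ x ∈ l, x ≠ a) :
    b + 1 ≤ czyG a l b := by
  induction l generalizing a b with
  | nil => simp at h
  | cons c t ih =>
    rw [czyG_cons]
    by_cases hc : c = a
    · subst hc
      simp only [ne_eq, not_true_eq_false, ite_false]
      rcases h with ⟨x, hx, hne⟩
      rcases List.mem_cons.mp hx with h1 | h2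
      · exact absurd h1 hne
      · exact ih c b ⟨x, h2, hne⟩
    · simp only [ne_eq, hc, not_false_eq_true, ite_true]
      exact czyG_ge t c (b + 1)

-- A's inner scan with counter ≥ 1 tests 'all remaining equal druga'
lemma inner_eq (l : List Char) (d : Char) (n : Nat) (hn : 1 ≤ n) :
    czyInnerA d l n = some (decide (∀ x ∈ l, x = d)) := by
  induction l generalizing n with
  | nil => simp [czyInnerA]; omega
  | cons c t ih =>
    by_cases h : c = d
    · subst h
      simp only [czyInnerA, ne_eq, not_true_eq_false, ite_false]
      rw [ih (n + 1) (by omega)]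
      simp
    · simp [czyInnerA, h]

-- A's outer loop agrees with B's pair count whenever some character differs from pierwsza
lemma outer_eq (l : List Char) (p : Char) (h : ∃ c ∈ l, c ≠ p) :
    czyOuterA p l = some (czyG p l 1 == 2) := by
  induction l with
  | nil => simp at h
  | cons c t ih =>
    by_cases hc : c = p
    · subst hc
      rcases h with ⟨x, hx, hne⟩
      rcases List.mem_cons.mp hx with h1 | h2
      · exact absurd h1 hne
      · rw [czyOuterA, if_pos rfl, czyG_cons]
        simp only [ne_eq, not_true_eq_false, ite_false]
        exact ih ⟨x, h2, hne⟩
    · rw [czyOuterA, if_neg hc, czyG_cons]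
      simp only [ne_eq, hc, not_false_eq_true, ite_true]
      rw [show czyInnerA c (c :: t) 0 = czyInnerA c t 1 by simp [czyInnerA]]
      rw [inner_eq t c 1 (le_refl 1)]
      by_cases hall : ∀ x ∈ t, x = c
      · rw [czyG_all t c 2 hall]
        simp only [beq_self_eq_true, Option.some.injEq, decide_eq_true_eq]
        exact hall
      · have hall2 : ∃ x ∈ t, x ≠ c := by
          by_contra hcon
          exact hall (fun x hx => by_contra (fun hne => hcon ⟨x, hx, hne⟩))
        have h3 := czyG_lt t c 2 hall2
        have hne2 : czyG c t 2 ≠ 2 := by omega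
        rcases hall2 with ⟨x, hx, hnx⟩
        rw [show (czyG c t 2 == 2) = false from beq_eq_false_iff_ne.mpr hne2]
        simp only [Option.some.injEq, decide_eq_false_iff_not]
        intro hcontra
        exact hnx (hcontra x hx)

-- B's fold over the string's pairs is czyG head tail
lemma fold_as_czyG (a : Char) (t : List Char) :
    ((a :: t).zip (a :: t).tail).foldl czyStepB 1 = czyG a t 1 := by
  simp [czyG]

-- ===== VERDICT (by name: the statement is the Claim_ definition above) =====
theorem czy_bloki_spec : Claim_equal_czy_bloki := by
  intro w _ hpre
  obtain ⟨hne, hpre2⟩ := hpre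
  unfold Spec_czy_bloki czy_bloki czy_bloki_alt
  cases hl : w.toList with
  | nil => exact absurd (String.toList_eq_nil_iff.mp hl) hne
  | cons a t =>
    have hg : PySem.Str.pyGet? w 0 = some a := by
      simp [PySem.Str.pyGet?, PySem.List.pyGet?, PySem.List.pyIdx?, hl]
    rw [hg]
    by_cases h1 : a = '1'
    · simp [h1]
    · simp only [h1, ite_false]
      rw [fold_as_czyG]
      rw [hl] at hpre2
      have hex : ∃ c ∈ a :: t, c ≠ a := by
        rcases hpre2 with hh | hex
        · simp at hh; exact absurd hh h1
        · rw [List.any_eq_true] at hex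
          simpa using hex
      have ho := outer_eq (a :: t) a hex
      rw [czyG_cons] at ho
      simpa using ho
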